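-- pv_equiv track=rewrite | github.com/memoization-over-Recursion/Algorithms-and-data-structures | repeatedMatrixValues.py | repeatedMatrixValues
-- ===== SOURCE A (Python) =====
-- def repeatedMatrixValues(matrix):
--     valueCounts = getCountsOfPotentialValues( matrix )
--     for row in range( len( matrix )):
--         for col in range( len( matrix[0] )):
--             val = matrix[ row ][ col ]
--             cc = row
--             checkAndIncrement( val , valueCounts , cc )
--     for col in range( len( matrix[0] )):
--         for row in range( len( matrix )):
--             val = matrix[ row ][ col ]
--             cc = len( matrix ) + col
--             checkAndIncrement( val , valueCounts , cc )
--
--     final = []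
--     for values in valueCounts:
--         if valueCounts[values] == len(matrix) + len( matrix[0] ):
--             final.append(values)
--
--     return final
--
-- def getCountsOfPotentialValues( matrix ):
--     valueCounts = {}
--     smaller = matrix[0]
--     if len( matrix ) < len( matrix[0] ):
--         smaller = map( lambda row : row[0] , matrix )
--
--
--     for val in smaller:
--         valueCounts[ val ] = 0
--
--     return valueCounts
--
-- def checkAndIncrement( val , valueCounts , cc ):
--     if val not in valueCounts:
--         return
--     if valueCounts[val] != cc:
--         return
--     valueCounts[val] += 1
-- ===== SOURCE B (Python) =====
-- def repeatedMatrixValues(matrix):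
--     nrows, ncols = len(matrix), len(matrix[0])
--     common = set(matrix[0])
--     for row in matrix:
--         common &= set(row[:ncols])
--     for c in range(ncols):
--         common &= {row[c] for row in matrix}
--     source = [row[0] for row in matrix] if nrows < ncols else matrix[0]
--     out, seen = [], set()
--     for v in source:
--         if v in common and v not in seen:
--             seen.add(v)
--             out.append(v)
--     return out
-- ===== Notes on version B (the rewrite author's own statement) =====
-- stated objective: simpler
-- what changed: A runs a per-value counter protocol (a dict of counts incremented only when the count equals the current row/column index) over two nested index passes; B instead intersects one set per row and per column and filters the ordering source (first row, or first column when the matrix is taller than wide) with first-occurrence dedup.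
import Mathlib
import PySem

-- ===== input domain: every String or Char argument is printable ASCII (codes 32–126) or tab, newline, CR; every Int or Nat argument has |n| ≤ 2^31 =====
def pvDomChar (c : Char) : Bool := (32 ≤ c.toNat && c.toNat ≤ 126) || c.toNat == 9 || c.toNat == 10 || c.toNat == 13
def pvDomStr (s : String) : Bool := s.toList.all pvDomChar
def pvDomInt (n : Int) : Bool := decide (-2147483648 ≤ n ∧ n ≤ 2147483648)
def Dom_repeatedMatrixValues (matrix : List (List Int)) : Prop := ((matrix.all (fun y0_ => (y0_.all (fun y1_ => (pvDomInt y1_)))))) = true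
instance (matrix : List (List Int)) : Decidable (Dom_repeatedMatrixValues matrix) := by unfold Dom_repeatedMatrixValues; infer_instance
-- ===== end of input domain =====

-- B replaces A's per-value counter protocol by row/column set intersections (objective: simpler).

-- ===== PORT A =====
def checkAndIncrement (val : Int) (valueCounts : PySem.Dict Int Int) (cc : Int) : PySem.Dict Int Int :=
  if valueCounts.contains val = false then valueCounts
  else if valueCounts.getD val 0 ≠ cc then valueCounts
  else valueCounts.insert val (valueCounts.getD val 0 + 1)

-- matrix[0] raises IndexError on the empty matrix; Pre_ excludes it, so headD [] is exact there.
-- row[0] / matrix[row][col]: in range under Pre_, so getD is exact there.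
def getCountsOfPotentialValues (matrix : List (List Int)) : PySem.Dict Int Int :=
  let smaller : List Int :=
    if matrix.length < (matrix.headD []).length then
      matrix.map (fun row => row.getD 0 0)
    else matrix.headD []
  smaller.foldl (fun d v => d.insert v 0) PySem.Dict.empty

def repeatedMatrixValues (matrix : List (List Int)) : List Int :=
  let vc0 := getCountsOfPotentialValues matrix
  let vc1 := (List.range matrix.length).foldl (fun d row =>
      (List.range (matrix.headD []).length).foldl (fun d col =>
        checkAndIncrement ((matrix.getD row []).getD col 0) d (row : Int)) d) vc0
  let vc2 := (List.range (matrix.headD []).length).foldl (fun d col =>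
      (List.range matrix.length).foldl (fun d row =>
        checkAndIncrement ((matrix.getD row []).getD col 0) d ((matrix.length : Int) + (col : Int))) d) vc1
  vc2.keys.foldl (fun final v =>
    if vc2.getD v 0 = (matrix.length : Int) + ((matrix.headD []).length : Int) then final ++ [v]
    else final) []

-- ===== PORT B =====
def repeatedMatrixValues_alt (matrix : List (List Int)) : List Int :=
  let ncols := (matrix.headD []).length      -- matrix[0] raises on []; Pre_ excludes it
  let common0 := PySem.Set.ofList (matrix.headD [])
  let common1 := matrix.foldl
      (fun s row => s.inter (PySem.Set.ofList (PySem.List.slice row none (some (ncols : Int))))) common0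
  let common2 := (List.range ncols).foldl
      (fun s c => s.inter (PySem.Set.ofList (matrix.map (fun row => row.getD c 0)))) common1
  let source := if matrix.length < ncols then matrix.map (fun row => row.getD 0 0) else matrix.headD []
  (source.foldl (fun (p : List Int × PySem.Set Int) v =>
      if common2.contains v && !(p.2.contains v) then (p.1 ++ [v], p.2.add v) else p)
    (([] : List Int), (PySem.Set.empty : PySem.Set Int))).1

-- ===== PRECONDITION & SPEC =====
-- Pre_ excludes exactly the inputs where A raises IndexError: the empty matrix (matrix[0]),
-- and ragged matrices with some row shorter than the first row (matrix[row][col] / row[0]).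
def Pre_repeatedMatrixValues (matrix : List (List Int)) : Prop :=
  matrix ≠ [] ∧ ∀ row ∈ matrix, (matrix.headD []).length ≤ row.length
instance (matrix : List (List Int)) : Decidable (Pre_repeatedMatrixValues matrix) := by
  unfold Pre_repeatedMatrixValues; infer_instance

def pvWitness_repeatedMatrixValues : List (List Int) := [[1, 2], [2, 1]]

def Spec_repeatedMatrixValues (matrix : List (List Int)) (out : List Int) : Prop := out = repeatedMatrixValues_alt matrix
instance (matrix : List (List Int)) (out : List Int) : Decidable (Spec_repeatedMatrixValues matrix out) := by unfold Spec_repeatedMatrixValues; infer_instance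

-- ===== CLAIM (what is proved, stated in full; the proofs are below) =====
def Claim_equal_repeatedMatrixValues : Prop := ∀ (matrix : List (List Int)), Dom_repeatedMatrixValues matrix → Pre_repeatedMatrixValues matrix → Spec_repeatedMatrixValues matrix (repeatedMatrixValues matrix)

-- ===== LEMMAS AND PROOFS =====

-- the candidate list A keys its dict by and B takes its output order from
def pvSmaller (matrix : List (List Int)) : List Int :=
  if matrix.length < (matrix.headD []).length then matrix.map (fun row => row.getD 0 0)
  else matrix.headD []

-- one inner scan of A: checkAndIncrement over a list of values at a fixed cc
def runCC (u : List Int) (cc : Int) (d : PySem.Dict Int Int) : PySem.Dict Int Int :=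
  u.foldl (fun d val => checkAndIncrement val d cc) d

-- one phase of A: units g 0, g 1, … at cc = b, b+1, …
def phaseFold (g : Nat → List Int) (b : Int) (n : Nat) (d : PySem.Dict Int Int) : PySem.Dict Int Int :=
  (List.range n).foldl (fun d j => runCC (g j) (b + (j : Int)) d) d

theorem keys_checkAndIncrement (val : Int) (d : PySem.Dict Int Int) (cc : Int) :
    (checkAndIncrement val d cc).keys = d.keys := by
  unfold checkAndIncrement
  split_ifs with h1 h2
  · rfl
  · rfl
  · exact PySem.Dict.keys_insert_of_contains d _ (by simpa using h1)

theorem contains_checkAndIncrement (val : Int) (d : PySem.Dict Int Int) (cc v : Int) :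
    (checkAndIncrement val d cc).contains v = d.contains v := by
  rw [PySem.Dict.contains_eq_decide_mem_keys, PySem.Dict.contains_eq_decide_mem_keys,
    keys_checkAndIncrement]

theorem getD_checkAndIncrement (val : Int) (d : PySem.Dict Int Int) (cc v : Int) :
    (checkAndIncrement val d cc).getD v 0 =
      if v = val ∧ d.contains val = true ∧ d.getD val 0 = cc then cc + 1 else d.getD v 0 := by
  by_cases h1 : d.contains val = false
  · simp [checkAndIncrement, h1]
  · have h1' : d.contains val = true := by simpa using h1
    by_cases h2 : d.getD val 0 = cc
    · have hstep : checkAndIncrement val d cc = d.insert val (d.getD val 0 + 1) := by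
        simp [checkAndIncrement, h1', h2]
      rw [hstep, PySem.Dict.getD_insert, h2]
      by_cases hv : v = val <;> simp [hv, h1']
    · have hstep : checkAndIncrement val d cc = d := by simp [checkAndIncrement, h1', h2]
      rw [hstep]
      simp [h2]

theorem keys_runCC (u : List Int) (cc : Int) (d : PySem.Dict Int Int) :
    (runCC u cc d).keys = d.keys := by
  induction u generalizing d with
  | nil => rfl
  | cons w rest ih => rw [runCC, List.foldl_cons, ← runCC, ih, keys_checkAndIncrement]

theorem getD_runCC (u : List Int) (cc : Int) (d : PySem.Dict Int Int) (v : Int) :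
    (runCC u cc d).getD v 0 =
      if d.contains v = true ∧ d.getD v 0 = cc ∧ v ∈ u then cc + 1 else d.getD v 0 := by
  induction u generalizing d with
  | nil => simp [runCC]
  | cons w rest ih =>
    rw [runCC, List.foldl_cons, ← runCC, ih, contains_checkAndIncrement,
      getD_checkAndIncrement]
    by_cases hvw : v = w
    · subst hvw
      by_cases hc : d.contains v = true
      · by_cases hg : d.getD v 0 = cc
        · have hne : ¬ (cc + 1 = cc) := by omega
          simp [hc, hg, hne]
        · simp [hc, hg]
      · simp [hc]
    · have hno : ¬ (v = w ∧ d.contains w = true ∧ d.getD w 0 = cc) := fun h => hvw h.1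
      simp [hvw, List.mem_cons]

theorem phaseFold_succ (g : Nat → List Int) (b : Int) (m : Nat) (d : PySem.Dict Int Int) :
    phaseFold g b (m + 1) d = runCC (g m) (b + (m : Int)) (phaseFold g b m d) := by
  rw [phaseFold, phaseFold, List.range_succ, List.foldl_append, List.foldl_cons, List.foldl_nil]

theorem keys_phaseFold (g : Nat → List Int) (b : Int) (n : Nat) (d : PySem.Dict Int Int) :
    (phaseFold g b n d).keys = d.keys := by
  induction n generalizing d with
  | zero => rfl
  | succ m ih =>
    rw [phaseFold_succ, keys_runCC, ih]

theorem contains_phaseFold (g : Nat → List Int) (b : Int) (n : Nat) (d : PySem.Dict Int Int) (v : Int) :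
    (phaseFold g b n d).contains v = d.contains v := by
  rw [PySem.Dict.contains_eq_decide_mem_keys, PySem.Dict.contains_eq_decide_mem_keys, keys_phaseFold]

theorem phase_stuck (g : Nat → List Int) (b : Int) (n : Nat) (d : PySem.Dict Int Int) (v : Int)
    (h : d.getD v 0 < b) : (phaseFold g b n d).getD v 0 = d.getD v 0 := by
  induction n with
  | zero => rfl
  | succ m ih =>
    rw [phaseFold_succ, getD_runCC, ih]
    have : ¬ (d.getD v 0 = b + (m : Int)) := by omega
    simp [this]

theorem phase_run (g : Nat → List Int) (b : Int) (n : Nat) (d : PySem.Dict Int Int) (v : Int)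
    (hc : d.contains v = true) (h : d.getD v 0 = b) :
    (phaseFold g b n d).getD v 0 =
      b + (((List.range n).takeWhile (fun j => decide (v ∈ g j))).length : Int) := by
  induction n with
  | zero => simpa [phaseFold] using h
  | succ m ih =>
    rw [phaseFold_succ, getD_runCC, ih, contains_phaseFold,
      List.range_succ, List.takeWhile_append]
    set t := ((List.range m).takeWhile (fun j => decide (v ∈ g j))).length with ht'
    simp only [List.length_range]
    have hle : t ≤ m := by
      simpa using (List.takeWhile_prefix (l := List.range m) (fun j => decide (v ∈ g j))).length_le
    by_cases ht : t = m
    · by_cases hm : v ∈ g m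
      · rw [if_pos ⟨hc, by rw [ht], hm⟩, if_pos ht]
        simp only [List.takeWhile_cons, List.takeWhile_nil, hm, decide_true, if_true,
          List.length_append, List.length_range, List.length_cons, List.length_nil]
        push_cast
        omega
      · rw [if_neg (by rintro ⟨-, -, h3⟩; exact hm h3), if_pos ht]
        simp only [List.takeWhile_cons, List.takeWhile_nil, hm, decide_false,
          Bool.false_eq_true, if_false, List.length_append, List.length_range, List.length_nil]
        omega
    · rw [if_neg (by rintro ⟨-, h2, -⟩; exact ht (by omega)), if_neg ht]

-- the dict A starts from: every stored (and defaulted) count is 0, keys = dedup of pvSmaller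
theorem getD_insert_zero_fold (l : List Int) (d : PySem.Dict Int Int)
    (h : ∀ k, d.getD k 0 = 0) (k : Int) :
    (l.foldl (fun d v => d.insert v 0) d).getD k 0 = 0 := by
  induction l generalizing d with
  | nil => exact h k
  | cons x rest ih =>
    rw [List.foldl_cons]
    exact ih _ (fun j => by rw [PySem.Dict.getD_insert]; split <;> simp [h])

theorem getD_init (matrix : List (List Int)) (k : Int) :
    (getCountsOfPotentialValues matrix).getD k 0 = 0 := by
  unfold getCountsOfPotentialValues
  exact getD_insert_zero_fold _ _ (fun j => PySem.Dict.getD_empty j 0) k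

theorem keys_init (matrix : List (List Int)) :
    (getCountsOfPotentialValues matrix).keys = PySem.Set.ofList (pvSmaller matrix) := by
  unfold getCountsOfPotentialValues pvSmaller
  rw [PySem.Dict.keys_foldl_insert _ (fun _ _ => (0 : Int))]
  simp [PySem.Set.update, PySem.Set.ofList_eq_foldl, PySem.Dict.keys_empty]

-- membership through B's chain of intersections
theorem mem_foldl_inter {β : Type} (f : β → PySem.Set Int) (l : List β) (s : PySem.Set Int) (v : Int) :
    v ∈ l.foldl (fun s x => s.inter (f x)) s ↔ v ∈ s ∧ ∀ x ∈ l, v ∈ f x := by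
  induction l generalizing s with
  | nil => simp
  | cons x rest ih =>
    rw [List.foldl_cons, ih]
    rw [PySem.Set.mem_inter]
    constructor
    · rintro ⟨⟨h1, h2⟩, h3⟩; exact ⟨h1, by simpa using ⟨h2, h3⟩⟩
    · rintro ⟨h1, h2⟩
      simp only [List.mem_cons] at h2
      exact ⟨⟨h1, h2 x (Or.inl rfl)⟩, fun y hy => h2 y (Or.inr hy)⟩

-- B's output loop carries seen = out; collapse the pair fold to a single-list fold
theorem pair_fold_eq (c : PySem.Set Int) (src : List Int) (out : List Int) :
    (src.foldl (fun (p : List Int × PySem.Set Int) v =>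
        if c.contains v && !(p.2.contains v) then (p.1 ++ [v], p.2.add v) else p) (out, out)) =
      (src.foldl (fun out v => if c.contains v && !(PySem.Set.contains out v) then out ++ [v] else out) out,
       src.foldl (fun out v => if c.contains v && !(PySem.Set.contains out v) then out ++ [v] else out) out) := by
  induction src generalizing out with
  | nil => rfl
  | cons w rest ih =>
    rw [List.foldl_cons, List.foldl_cons]
    by_cases h : (c.contains w && !(PySem.Set.contains out w)) = true
    · have hnc : PySem.Set.contains out w = false := by
        cases hcw : PySem.Set.contains out w
        · rfl
        · exfalso; rw [hcw] at h; simp at h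
      have hadd : PySem.Set.add out w = out ++ [w] := by
        rw [PySem.Set.add, hnc]; simp
      rw [if_pos h, hadd, if_pos h]
      exact ih (out ++ [w])
    · rw [if_neg h, if_neg h]
      exact ih out

-- first-occurrence dedup + filter: A filters the dict's key list, B filters while deduping
theorem filter_fold (c : Int → Bool) (src : List Int) :
    ∀ S : List Int,
      (src.foldl PySem.Set.add S).filter c =
        src.foldl (fun out v => if c v && !(PySem.Set.contains out v) then out ++ [v] else out)
          (S.filter c) := by
  induction src with
  | nil => intro S; rfl
  | cons w rest ih =>
    intro S
    rw [List.foldl_cons, List.foldl_cons]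
    by_cases hw : PySem.Set.contains S w = true
    · have hadd : PySem.Set.add S w = S := by rw [PySem.Set.add, if_pos hw]
      rw [hadd]
      by_cases hc : c w = true
      · have hcf : PySem.Set.contains (S.filter c) w = true := by
          have hmem : w ∈ S := by simpa [PySem.Set.contains] using hw
          simp [PySem.Set.contains, List.mem_filter, hc]
          tauto
        rw [if_neg (by rw [hc, hcf]; simp)]
        exact ih S
      · rw [Bool.not_eq_true] at hc
        rw [if_neg (by rw [hc]; simp)]
        exact ih S
    · rw [Bool.not_eq_true] at hw
      have hadd : PySem.Set.add S w = S ++ [w] := by rw [PySem.Set.add, hw]; simp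
      rw [hadd]
      by_cases hc : c w = true
      · have hnc : PySem.Set.contains (S.filter c) w = false := by
          have hmem : w ∉ S := by simpa [PySem.Set.contains] using hw
          simp [PySem.Set.contains, List.mem_filter]
          tauto
        rw [if_pos (by rw [hc, hnc]; rfl)]
        have hfil : List.filter c (S ++ [w]) = List.filter c S ++ [w] := by
          simp [List.filter_append, hc]
        rw [← hfil]
        exact ih (S ++ [w])
      · rw [Bool.not_eq_true] at hc
        rw [if_neg (by rw [hc]; simp)]
        have hfil : List.filter c (S ++ [w]) = List.filter c S := by
          simp [List.filter_append, hc]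
        rw [← hfil]
        exact ih (S ++ [w])

-- abbreviations for the two phases' unit lists and results
def rowUf (matrix : List (List Int)) (r : Nat) : List Int :=
  (List.range (matrix.headD []).length).map (fun col => (matrix.getD r []).getD col 0)

def colUf (matrix : List (List Int)) (c : Nat) : List Int :=
  (List.range matrix.length).map (fun row => (matrix.getD row []).getD c 0)

def pvFinal (matrix : List (List Int)) : PySem.Dict Int Int :=
  phaseFold (colUf matrix) (matrix.length : Int) (matrix.headD []).length
    (phaseFold (rowUf matrix) 0 matrix.length (getCountsOfPotentialValues matrix))

def pvCommon (matrix : List (List Int)) : PySem.Set Int :=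
  (List.range (matrix.headD []).length).foldl
    (fun s c => s.inter (PySem.Set.ofList (matrix.map (fun row => row.getD c 0))))
    (matrix.foldl
      (fun s row => s.inter (PySem.Set.ofList
        (PySem.List.slice row none (some ((matrix.headD []).length : Int)))))
      (PySem.Set.ofList (matrix.headD [])))

theorem foldl_append_ite {α : Type} (P : α → Prop) [DecidablePred P] (l acc : List α) :
    l.foldl (fun final v => if P v then final ++ [v] else final) acc =
      acc ++ l.filter (fun v => decide (P v)) := by
  have h : (fun (final : List α) v => if P v then final ++ [v] else final)
      = (fun final v => if (fun v => decide (P v)) v = true then final ++ [id v] else final) := by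
    funext final v
    by_cases h : P v <;> simp [h]
  rw [h, PySem.List.foldl_append_if]
  simp

theorem portA_eq (matrix : List (List Int)) :
    repeatedMatrixValues matrix =
      (pvFinal matrix).keys.filter (fun v => decide ((pvFinal matrix).getD v 0 =
        (matrix.length : Int) + ((matrix.headD []).length : Int))) := by
  simp only [repeatedMatrixValues, pvFinal, phaseFold, runCC, rowUf, colUf,
    List.foldl_map, zero_add]
  rw [foldl_append_ite]
  simp

theorem portB_eq (matrix : List (List Int)) :
    repeatedMatrixValues_alt matrix =
      (PySem.Set.ofList (pvSmaller matrix)).filter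
        (fun v => PySem.Set.contains (pvCommon matrix) v) := by
  change (List.foldl (fun (p : List Int × PySem.Set Int) v =>
      if (pvCommon matrix).contains v && !(p.2.contains v) then (p.1 ++ [v], p.2.add v) else p)
      (([] : List Int), ([] : PySem.Set Int)) (pvSmaller matrix)).1 = _
  rw [pair_fold_eq]
  have h2 := filter_fold (fun v => PySem.Set.contains (pvCommon matrix) v) (pvSmaller matrix) []
  simp only [List.filter_nil] at h2
  rw [← PySem.Set.ofList_eq_foldl] at h2
  exact h2.symm

theorem keys_pvFinal (matrix : List (List Int)) :
    (pvFinal matrix).keys = PySem.Set.ofList (pvSmaller matrix) := by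
  rw [pvFinal, keys_phaseFold, keys_phaseFold, keys_init]

theorem takeWhile_range_full (p : Nat → Bool) (n : Nat) :
    ((List.range n).takeWhile p).length = n ↔ ∀ j < n, p j = true := by
  constructor
  · intro h
    have := (List.takeWhile_prefix (l := List.range n) p).eq_of_length
      (by rw [h, List.length_range])
    intro j hj
    exact List.takeWhile_eq_self_iff.mp this j (List.mem_range.mpr hj)
  · intro h
    rw [List.takeWhile_eq_self_iff.mpr (fun j hj => h j (List.mem_range.mp hj)),
      List.length_range]

theorem getD_pvFinal_iff (matrix : List (List Int)) (v : Int) (hv : v ∈ pvSmaller matrix) :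
    ((pvFinal matrix).getD v 0 = (matrix.length : Int) + ((matrix.headD []).length : Int))
      ↔ (∀ r < matrix.length, v ∈ rowUf matrix r) ∧
        (∀ c < (matrix.headD []).length, v ∈ colUf matrix c) := by
  have hc0 : (getCountsOfPotentialValues matrix).contains v = true := by
    rw [PySem.Dict.contains_iff_mem_keys, keys_init, PySem.Set.mem_ofList]
    exact hv
  have hg0 : (getCountsOfPotentialValues matrix).getD v 0 = 0 := getD_init matrix v
  have hrow := phase_run (rowUf matrix) 0 matrix.length (getCountsOfPotentialValues matrix) v hc0 hg0
  rw [zero_add] at hrow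
  set t := ((List.range matrix.length).takeWhile (fun j => decide (v ∈ rowUf matrix j))).length
    with htdef
  have hcont1 : (phaseFold (rowUf matrix) 0 matrix.length
      (getCountsOfPotentialValues matrix)).contains v = true := by
    rw [contains_phaseFold]; exact hc0
  have hle : t ≤ matrix.length := by
    have hpl := (List.takeWhile_prefix
      (l := List.range matrix.length) (fun j => decide (v ∈ rowUf matrix j))).length_le
    rwa [List.length_range] at hpl
  rw [pvFinal]
  by_cases ht : t = matrix.length
  · have hrun := phase_run (colUf matrix) (matrix.length : Int) (matrix.headD []).length
      (phaseFold (rowUf matrix) 0 matrix.length (getCountsOfPotentialValues matrix)) v hcont1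
      (by rw [hrow, ht])
    rw [hrun]
    set t2 := ((List.range (matrix.headD []).length).takeWhile
      (fun j => decide (v ∈ colUf matrix j))).length with ht2def
    have hle2 : t2 ≤ (matrix.headD []).length := by
      have hpl := (List.takeWhile_prefix
        (l := List.range (matrix.headD []).length) (fun j => decide (v ∈ colUf matrix j))).length_le
      rwa [List.length_range] at hpl
    constructor
    · intro heq
      have ht2 : t2 = (matrix.headD []).length := by omega
      refine ⟨fun r hr => of_decide_eq_true ((takeWhile_range_full _ _).mp ht r hr),
        fun c hc => of_decide_eq_true ((takeWhile_range_full _ _).mp ht2 c hc)⟩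
    · rintro ⟨hr, hcc⟩
      have ht2 : t2 = (matrix.headD []).length :=
        (takeWhile_range_full _ _).mpr (fun j hj => decide_eq_true (hcc j hj))
      rw [ht2]
  · have hlt : (phaseFold (rowUf matrix) 0 matrix.length
        (getCountsOfPotentialValues matrix)).getD v 0 < (matrix.length : Int) := by
      rw [hrow]; omega
    rw [phase_stuck _ _ _ _ _ hlt, hrow]
    constructor
    · intro heq
      exfalso; omega
    · rintro ⟨hr, -⟩
      exact absurd ((takeWhile_range_full _ _).mpr (fun j hj => decide_eq_true (hr j hj))) ht

theorem mem_pvCommon (matrix : List (List Int)) (v : Int) :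
    PySem.Set.contains (pvCommon matrix) v = true ↔
      (v ∈ matrix.headD [] ∧
        ∀ row ∈ matrix, v ∈ PySem.List.slice row none (some ((matrix.headD []).length : Int))) ∧
      ∀ c < (matrix.headD []).length, v ∈ matrix.map (fun row => row.getD c 0) := by
  have hcm : PySem.Set.contains (pvCommon matrix) v = true ↔ v ∈ pvCommon matrix := by
    simp [PySem.Set.contains]
  rw [hcm, pvCommon, mem_foldl_inter, mem_foldl_inter]
  simp [PySem.Set.mem_ofList, List.mem_range]

theorem rowUf_take (matrix : List (List Int)) (r : Nat) (h : r < matrix.length)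
    (hC : (matrix.headD []).length ≤ matrix[r].length) :
    rowUf matrix r = matrix[r].take (matrix.headD []).length := by
  apply List.ext_getElem
  · rw [rowUf]
    simp only [List.length_map, List.length_range, List.length_take]
    omega
  · intro i h1 h2
    simp only [rowUf, List.getElem_map, List.getElem_range, List.getElem_take]
    rw [List.getD_eq_getElem matrix [] h,
      List.getD_eq_getElem _ _ (by simp only [List.length_take] at h2; omega)]

theorem colUf_map (matrix : List (List Int)) (c : Nat) :
    colUf matrix c = matrix.map (fun row => row.getD c 0) := by
  apply List.ext_getElem
  · rw [colUf]
    simp only [List.length_map, List.length_range]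
  · intro i h1 h2
    simp only [colUf, List.getElem_map, List.getElem_range]
    rw [List.getD_eq_getElem matrix [] (by simpa using h2)]

theorem pred_iff (matrix : List (List Int)) (hne : matrix ≠ [])
    (hC : ∀ row ∈ matrix, (matrix.headD []).length ≤ row.length) (v : Int)
    (hv : v ∈ pvSmaller matrix) :
    ((pvFinal matrix).getD v 0 = (matrix.length : Int) + ((matrix.headD []).length : Int))
      ↔ PySem.Set.contains (pvCommon matrix) v = true := by
  have hlen : 0 < matrix.length := List.length_pos_of_ne_nil hne
  have hCm : ∀ r (h : r < matrix.length), (matrix.headD []).length ≤ matrix[r].length :=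
    fun r h => hC _ (List.getElem_mem h)
  have hhead : matrix.headD [] = matrix[0]'hlen := by
    cases matrix with
    | nil => exact absurd rfl hne
    | cons a l => rfl
  have hslice : ∀ row ∈ matrix,
      PySem.List.slice row none (some ((matrix.headD []).length : Int)) =
        row.take (matrix.headD []).length := by
    intro row hrow
    rw [PySem.List.slice_to row (Int.natCast_nonneg _)]
    simp
  rw [getD_pvFinal_iff matrix v hv, mem_pvCommon]
  constructor
  · rintro ⟨hr, hcc⟩
    refine ⟨⟨?_, ?_⟩, ?_⟩
    · have h0 := hr 0 hlen
      rw [rowUf_take matrix 0 hlen (hCm 0 hlen)] at h0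
      rw [hhead]
      exact List.mem_of_mem_take h0
    · intro row hrow
      rw [hslice row hrow]
      obtain ⟨r, hrlt, rfl⟩ := List.mem_iff_getElem.mp hrow
      have hmem := hr r hrlt
      rw [rowUf_take matrix r hrlt (hCm r hrlt)] at hmem
      exact hmem
    · intro c hc
      have hmem := hcc c hc
      rw [colUf_map] at hmem
      exact hmem
  · rintro ⟨⟨h0, hrows⟩, hcols⟩
    constructor
    · intro r hrlt
      rw [rowUf_take matrix r hrlt (hCm r hrlt)]
      have hmem := hrows _ (List.getElem_mem hrlt)
      rw [hslice _ (List.getElem_mem hrlt)] at hmem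
      exact hmem
    · intro c hc
      rw [colUf_map]
      exact hcols c hc

-- ===== VERDICT (by name: the statement is the Claim_ definition above) =====
theorem repeatedMatrixValues_spec : Claim_equal_repeatedMatrixValues := by
  intro matrix _hdom hpre
  obtain ⟨hne, hC⟩ := hpre
  unfold Spec_repeatedMatrixValues
  rw [portA_eq, portB_eq, keys_pvFinal]
  apply List.filter_congr
  intro v hvS
  have hv : v ∈ pvSmaller matrix := (PySem.Set.mem_ofList _ v).mp hvS
  rw [Bool.eq_iff_iff]
  simp only [decide_eq_true_eq]
  exact pred_iff matrix hne hC v hv
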